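-- pv_equiv track=rewrite | github.com/Barbariansyah/pyjudge | test/deret_false.py | deret_false
-- ===== SOURCE A (Python) =====
-- def deret_false(n):
--     summ=0
--     for i in range (1,n+1,2):
--         if summ > 10:
--             return -1
--         summ=summ + i
--         i=0+i
--     return summ
-- ===== SOURCE B (Python) =====
-- def deret_false(n):
--     # closed form: the sum of the first k odd numbers is k squared; A's loop
--     # checks its running sum against the threshold before adding, so it keeps
--     # returning squares until the count reaches the early-exit point, after
--     # which it always returns the sentinel.
--     count = max(0, (n + 1) // 2)
--     return count * count if count < 5 else -1
-- ===== Notes on version B (the rewrite author's own statement) =====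
-- stated objective: simpler
-- what changed: Replaced the accumulating loop over the odd numbers by a closed form: count the odd terms and return the square of that count below the early-exit point, the sentinel from there on.
import Mathlib
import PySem

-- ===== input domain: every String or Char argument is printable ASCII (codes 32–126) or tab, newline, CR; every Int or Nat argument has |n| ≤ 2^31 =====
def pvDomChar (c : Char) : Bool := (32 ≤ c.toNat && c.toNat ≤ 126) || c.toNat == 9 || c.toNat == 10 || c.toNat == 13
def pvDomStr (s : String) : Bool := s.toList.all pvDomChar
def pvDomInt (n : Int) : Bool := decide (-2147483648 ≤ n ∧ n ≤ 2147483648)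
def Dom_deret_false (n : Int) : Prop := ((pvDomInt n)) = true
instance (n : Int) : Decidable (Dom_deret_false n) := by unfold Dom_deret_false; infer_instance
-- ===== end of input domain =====

-- B replaces A's accumulating loop by a closed form: the square of the number of odd terms below the early-exit point, the sentinel from there on; objective: simpler.

-- ===== PORT A =====
-- 'for i in range(1, n+1, 2)' with the early return; Python's range is a lazy
-- iterator, so the loop is ported as the stepping recursion i = 1, 3, 5, …
def deretGo (stop i summ : Int) : Int :=
  if _h : i < stop then
    if summ > 10 then -1 else deretGo stop (i + 2) (summ + i)
  else summ
termination_by (stop - i).toNat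
decreasing_by omega

def deret_false (n : Int) : Int := deretGo (n + 1) 1 0

-- ===== PORT B =====
def deret_false_alt (n : Int) : Int :=
  let count := max 0 (PySem.Int.floordiv (n + 1) 2)
  if count < 5 then count * count else -1

-- ===== PRECONDITION & SPEC =====
def Spec_deret_false (n : Int) (out : Int) : Prop := out = deret_false_alt n
instance (n : Int) (out : Int) : Decidable (Spec_deret_false n out) := by unfold Spec_deret_false; infer_instance

-- ===== CLAIM (what is proved, stated in full; the proofs are below) =====
def Claim_equal_deret_false : Prop := ∀ (n : Int), Dom_deret_false n → Spec_deret_false n (deret_false n)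

-- ===== LEMMAS AND PROOFS =====

-- the loop body over an explicit list of the iterated values
def deretLoop : List Int → Int → Int
  | [], summ => summ
  | i :: rest, summ => if summ > 10 then -1 else deretLoop rest (summ + i)

-- the stepping recursion equals the loop over the materialised list of values
theorem deretGo_eq_loop (m : Nat) : ∀ (stop i summ : Int),
    m = (if i < stop then ((stop - i + 1) / 2).toNat else 0) →
    deretGo stop i summ
      = deretLoop (List.map (fun k : Nat => i + 2 * (k : Int)) (List.range m)) summ := by
  induction m with
  | zero =>
    intro stop i summ h
    have hlt : ¬ i < stop := by
      by_cases hc : i < stop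
      · rw [if_pos hc] at h; omega
      · exact hc
    rw [deretGo, dif_neg hlt]
    simp [deretLoop]
  | succ m ih =>
    intro stop i summ h
    have hlt : i < stop := by
      by_cases hc : i < stop
      · exact hc
      · rw [if_neg hc] at h; omega
    rw [if_pos hlt] at h
    rw [deretGo, dif_pos hlt, List.range_succ_eq_map]
    simp only [List.map_cons, List.map_map, deretLoop]
    by_cases hs : summ > 10
    · rw [if_pos hs, if_pos hs]
    · rw [if_neg hs, if_neg hs]
      have hrec : m = (if i + 2 < stop then ((stop - (i + 2) + 1) / 2).toNat else 0) := by
        by_cases hc : i + 2 < stop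
        · rw [if_pos hc]; omega
        · rw [if_neg hc]; omega
      rw [ih stop (i + 2) (summ + i) hrec]
      congr 1
      · exact List.map_congr_left (fun k _ => by
          simp only [Function.comp_apply]; push_cast; ring)
      · push_cast; ring

-- A's loop over the first m odd numbers: m*m if it finishes, -1 once summ exceeds 10
theorem deretLoop_range (m : Nat) :
    deretLoop (List.map (fun k : Nat => 1 + 2 * (k : Int)) (List.range m)) 0
      = if m < 5 then (m : Int) * m else -1 := by
  by_cases h : m < 5
  · interval_cases m <;> simp [deretLoop, List.range_succ]
  · obtain ⟨r, rfl⟩ : ∃ r, m = 5 + r := ⟨m - 5, by omega⟩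
    rw [List.range_add]
    simp [deretLoop, List.range_succ]

-- ===== VERDICT (by name: the statement is the Claim_ definition above) =====
theorem deret_false_spec : Claim_equal_deret_false := by
  intro n _
  unfold Spec_deret_false deret_false deret_false_alt
  dsimp only
  have h2 : PySem.Int.floordiv (n + 1) 2 = (n + 1) / 2 :=
    PySem.Int.floordiv_eq_ediv_of_pos (by norm_num)
  rw [h2]
  rw [deretGo_eq_loop (if 1 < n + 1 then ((n + 1 - 1 + 1) / 2).toNat else 0) (n + 1) 1 0 rfl]
  by_cases hn : 1 < n + 1
  · rw [if_pos hn, show n + 1 - 1 + 1 = n + 1 from by ring, deretLoop_range]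
    have ht : ((((n + 1) / 2).toNat : Nat) : Int) = (n + 1) / 2 :=
      Int.toNat_of_nonneg (by omega)
    rw [max_eq_right (by omega : (0 : Int) ≤ (n + 1) / 2)]
    by_cases h5 : (n + 1) / 2 < 5
    · rw [if_pos (by omega : ((n + 1) / 2).toNat < 5), if_pos h5, ht]
    · rw [if_neg (by omega : ¬ ((n + 1) / 2).toNat < 5), if_neg h5]
  · rw [if_neg hn, max_eq_left (by omega : (n + 1) / 2 ≤ 0)]
    norm_num [deretLoop]
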